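-- pv_equiv track=rewrite | github.com/LiPu-jpg/Openwrite_skill | tools/shared_documents.py | _match_section
-- ===== SOURCE A (Python) =====
-- def _match_section(ref: str, sections: dict[str, str]) -> tuple[str, str] | None:
--     needle = ref.strip().lower()
--     for title, text in sections.items():
--         if title.strip().lower() == needle:
--             return title, text
--     for title, text in sections.items():
--         lowered = title.strip().lower()
--         if needle in lowered or lowered in needle:
--             return title, text
--     return None
-- ===== SOURCE B (Python) =====
-- def _match_section(ref: str, sections: dict[str, str]) -> tuple[str, str] | None:
--     needle = ref.strip().lower()
--     fallback = None
--     for title, text in sections.items():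
--         lowered = title.strip().lower()
--         if lowered == needle:
--             return title, text
--         if fallback is None and (needle in lowered or lowered in needle):
--             fallback = (title, text)
--     return fallback
-- ===== Notes on version B (the rewrite author's own statement) =====
-- stated objective: simpler
-- what changed: Single pass over the items with a first-substring-match fallback accumulator replaces A's two sequential scans of the dict.
import Mathlib
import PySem

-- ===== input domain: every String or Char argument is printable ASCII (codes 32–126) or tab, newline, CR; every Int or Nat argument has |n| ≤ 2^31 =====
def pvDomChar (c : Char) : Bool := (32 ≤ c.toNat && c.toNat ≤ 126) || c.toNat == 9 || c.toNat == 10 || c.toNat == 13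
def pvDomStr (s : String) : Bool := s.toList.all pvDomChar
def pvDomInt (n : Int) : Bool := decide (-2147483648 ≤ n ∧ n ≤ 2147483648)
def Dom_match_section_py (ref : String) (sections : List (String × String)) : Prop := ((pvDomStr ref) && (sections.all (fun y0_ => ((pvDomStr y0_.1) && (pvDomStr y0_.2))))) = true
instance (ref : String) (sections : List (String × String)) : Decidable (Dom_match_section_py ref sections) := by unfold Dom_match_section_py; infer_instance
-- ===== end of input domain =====

-- B replaces A's two sequential scans by one pass with a first-substring-match fallback accumulator (simpler).

-- ===== PORT A =====
-- first loop of A: return the first exact (stripped, lowered) title match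
def matchExactA (needle : String) : List (String × String) → Option (String × String)
  | [] => none
  | (title, text) :: rest =>
    if PySem.Str.lower (PySem.Str.strip title) == needle then some (title, text)
    else matchExactA needle rest

-- second loop of A: return the first mutual-substring match
def matchSubA (needle : String) : List (String × String) → Option (String × String)
  | [] => none
  | (title, text) :: rest =>
    let lowered := PySem.Str.lower (PySem.Str.strip title)
    if PySem.Str.isIn needle lowered || PySem.Str.isIn lowered needle then some (title, text)
    else matchSubA needle rest

def match_section_py (ref : String) (sections : List (String × String)) : Option (String × String) :=
  let needle := PySem.Str.lower (PySem.Str.strip ref)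
  match matchExactA needle sections with
  | some r => some r
  | none => matchSubA needle sections

-- ===== PORT B =====
-- single loop: exact match returns immediately, first substring match is recorded once in fb
def loopB (needle : String) (fb : Option (String × String)) : List (String × String) → Option (String × String)
  | [] => fb
  | (title, text) :: rest =>
    let lowered := PySem.Str.lower (PySem.Str.strip title)
    if lowered == needle then some (title, text)
    else if fb.isNone && (PySem.Str.isIn needle lowered || PySem.Str.isIn lowered needle) then
      loopB needle (some (title, text)) rest
    else loopB needle fb rest

def match_section_py_alt (ref : String) (sections : List (String × String)) : Option (String × String) :=
  loopB (PySem.Str.lower (PySem.Str.strip ref)) none sections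

-- ===== PRECONDITION & SPEC =====
def Spec_match_section_py (ref : String) (sections : List (String × String)) (out : Option (String × String)) : Prop := out = match_section_py_alt ref sections
instance (ref : String) (sections : List (String × String)) (out : Option (String × String)) : Decidable (Spec_match_section_py ref sections out) := by unfold Spec_match_section_py; infer_instance

-- ===== CLAIM (what is proved, stated in full; the proofs are below) =====
def Claim_equal_match_section_py : Prop := ∀ (ref : String) (sections : List (String × String)), Dom_match_section_py ref sections → Spec_match_section_py ref sections (match_section_py ref sections)

-- ===== LEMMAS AND PROOFS =====

-- if A's first scan finds an exact match, B's loop returns it regardless of the fallback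
theorem loopB_of_exact (needle : String) (r : String × String) :
    ∀ (sections : List (String × String)), matchExactA needle sections = some r →
      ∀ fb, loopB needle fb sections = some r := by
  intro sections
  induction sections with
  | nil => intro h; simp [matchExactA] at h
  | cons p rest ih =>
    obtain ⟨title, text⟩ := p
    intro h fb
    by_cases hx : PySem.Str.lower (PySem.Str.strip title) == needle
    · simp [matchExactA, hx] at h
      simp [loopB, hx, h]
    · simp [matchExactA, hx] at h
      simp only [loopB]
      rw [if_neg hx]
      split_ifs <;> exact ih h _

-- if A's first scan finds nothing, B's loop yields the fallback if set, else A's second scan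
theorem loopB_of_no_exact (needle : String) :
    ∀ (sections : List (String × String)), matchExactA needle sections = none →
      ∀ fb, loopB needle fb sections = fb.orElse (fun _ => matchSubA needle sections) := by
  intro sections
  induction sections with
  | nil => intro _ fb; cases fb <;> simp [loopB, matchSubA]
  | cons p rest ih =>
    obtain ⟨title, text⟩ := p
    intro h fb
    by_cases hx : PySem.Str.lower (PySem.Str.strip title) == needle
    · simp [matchExactA, hx] at h
    · simp [matchExactA, hx] at h
      by_cases hs : (PySem.Str.isIn needle (PySem.Str.lower (PySem.Str.strip title)) ||
          PySem.Str.isIn (PySem.Str.lower (PySem.Str.strip title)) needle) = true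
      · cases fb with
        | none => simp [loopB, hx, hs, matchSubA, ih h, Option.orElse]
        | some r => simp [loopB, hx, hs, matchSubA, ih h, Option.orElse]
      · cases fb with
        | none => simp [loopB, hx, hs, matchSubA, ih h, Option.orElse]
        | some r => simp [loopB, hx, hs, matchSubA, ih h, Option.orElse]

-- ===== VERDICT (by name: the statement is the Claim_ definition above) =====
theorem match_section_py_spec : Claim_equal_match_section_py := by
  intro ref sections _
  unfold Spec_match_section_py match_section_py match_section_py_alt
  cases h : matchExactA (PySem.Str.lower (PySem.Str.strip ref)) sections with
  | some r => simp only [h]; exact (loopB_of_exact _ _ _ h _).symm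
  | none => simp only [h]; exact (loopB_of_no_exact _ _ h none).symm
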